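-- pv_equiv track=rewrite | github.com/revanthmadasu/my-code-collection | problem solving/algorithms-approaches/recursion/backtracking/max-events-attended-2.py | getNextEvent
-- ===== SOURCE A (Python) =====
-- def getNextEvent(events, pos):
--     selectedEvent = events[pos]
--     start = pos+1
--     end = len(events)
--     while start < end:
--         mid = (start + end) // 2
--         if events[mid][0] > selectedEvent[1]:
--             end = mid
--         else:
--             start = mid + 1
--     return end
-- ===== SOURCE B (Python) =====
-- def getNextEvent(events, pos):
--     bound = events[pos][1]
--
--     def search(seg, lo):
--         if not seg:
--             return lo
--         k = len(seg) // 2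
--         if seg[k][0] > bound:
--             return search(seg[:k], lo)
--         else:
--             return search(seg[k + 1:], lo + k + 1)
--
--     return search(events[pos + 1:], pos + 1)
-- ===== Notes on version B (the rewrite author's own statement) =====
-- stated objective: alternative
-- what changed: A's imperative while-loop over an index interval (start, end) is replaced by a divide-and-conquer recursion on list segments: B slices the suffix events[pos+1:] and recursively searches seg[:k] or seg[k+1:] while carrying an offset accumulator.
-- outside the precondition, e.g. on getNextEvent([(1, 2), (3, 4), (5, 6)], -3): A returns 1, B returns -2; on getNextEvent([(0, 0), (1, 1)], -2): A returns 1, B returns -1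
import Mathlib
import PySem

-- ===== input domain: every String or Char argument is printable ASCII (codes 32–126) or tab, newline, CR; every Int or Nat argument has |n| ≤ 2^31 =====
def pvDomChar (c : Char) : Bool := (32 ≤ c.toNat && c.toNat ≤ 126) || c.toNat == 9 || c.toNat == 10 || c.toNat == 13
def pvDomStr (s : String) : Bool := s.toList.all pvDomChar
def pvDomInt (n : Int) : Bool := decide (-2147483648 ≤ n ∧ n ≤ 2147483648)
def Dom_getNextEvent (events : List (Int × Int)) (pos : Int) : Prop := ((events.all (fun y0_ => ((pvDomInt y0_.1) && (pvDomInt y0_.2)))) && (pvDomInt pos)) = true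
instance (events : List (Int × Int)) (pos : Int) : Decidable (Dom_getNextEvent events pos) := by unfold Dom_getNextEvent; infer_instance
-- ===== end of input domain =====

-- B replaces A's index-interval while-loop by divide-and-conquer recursion on list segments
-- (slices) with an offset accumulator; objective: alternative decomposition (not faster).

-- ===== PORT A =====
-- the while-loop of A, state (start, end); the `none` branch is an IndexError (unreachable under Pre_)
def pvLoopA (events : List (Int × Int)) (bound : Int) (start fin : Int) : Int :=
  if _h : start < fin then
    let mid := PySem.Int.floordiv (start + fin) 2
    match PySem.List.pyGet? events mid with
    | none => fin
    | some e =>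
      if e.1 > bound then pvLoopA events bound start mid
      else pvLoopA events bound (mid + 1) fin
  else fin
termination_by (fin - start).toNat
decreasing_by
  · have h2 : PySem.Int.floordiv (start + fin) 2 < fin := by
      rw [PySem.Int.floordiv_lt_iff_lt_mul (by omega)]; omega
    omega
  · have h1 : start ≤ PySem.Int.floordiv (start + fin) 2 ∧
        PySem.Int.floordiv (start + fin) 2 ≤ fin :=
      PySem.Int.floordiv_two_mid_bounds (by omega)
    omega

def getNextEvent (events : List (Int × Int)) (pos : Int) : Int :=
  match PySem.List.pyGet? events pos with
  | none => 0   -- IndexError on events[pos]; excluded by Pre_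
  | some selectedEvent => pvLoopA events selectedEvent.2 (pos + 1) (events.length : Int)

-- ===== PORT B =====
-- Source B's `search(seg, lo)`: recursion on the segment, `lo` is the offset of seg in events;
-- the `none` branch is unreachable (0 ≤ len//2 < len for nonempty seg)
def pvSearchB (bound : Int) (seg : List (Int × Int)) (lo : Int) : Int :=
  if seg.isEmpty then lo
  else
    let k := PySem.Int.floordiv (seg.length : Int) 2
    match PySem.List.pyGet? seg k with
    | none => lo
    | some e =>
      if e.1 > bound then pvSearchB bound (PySem.List.slice seg none (some k)) lo
      else pvSearchB bound (PySem.List.slice seg (some (k + 1)) none) (lo + k + 1)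
termination_by seg.length
decreasing_by
  · have hk : PySem.Int.floordiv (seg.length : Int) 2 = ((seg.length / 2 : Nat) : Int) := by
      exact_mod_cast PySem.Int.floordiv_natCast seg.length 2
    rename_i h
    have hne : seg.length ≠ 0 := by simpa [List.isEmpty_iff] using h
    rw [hk, PySem.List.slice_to_natCast]
    simp only [List.length_take]
    omega
  · have hk : PySem.Int.floordiv (seg.length : Int) 2 = ((seg.length / 2 : Nat) : Int) := by
      exact_mod_cast PySem.Int.floordiv_natCast seg.length 2
    have hk1 : PySem.Int.floordiv (seg.length : Int) 2 + 1 = ((seg.length / 2 + 1 : Nat) : Int) := by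
      rw [hk]; push_cast; ring
    rename_i h
    have hne : seg.length ≠ 0 := by simpa [List.isEmpty_iff] using h
    rw [hk1, PySem.List.slice_from_natCast]
    simp only [List.length_drop]
    omega

def getNextEvent_alt (events : List (Int × Int)) (pos : Int) : Int :=
  match PySem.List.pyGet? events pos with
  | none => 0   -- IndexError on events[pos]; excluded by Pre_
  | some selectedEvent =>
    pvSearchB selectedEvent.2 (PySem.List.slice events (some (pos + 1)) none) (pos + 1)

-- ===== PRECONDITION & SPEC =====
-- Pre_ excludes out-of-range pos (A raises IndexError) and pos ≤ -2, where A returns a value but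
-- A's search over a mix of wrapped and plain indices and B's search over the true suffix are both
-- accidental index-convention artefacts that no caller would specify either way.
def Pre_getNextEvent (events : List (Int × Int)) (pos : Int) : Prop :=
  events ≠ [] ∧ -1 ≤ pos ∧ pos < (events.length : Int)
instance (events : List (Int × Int)) (pos : Int) : Decidable (Pre_getNextEvent events pos) := by
  unfold Pre_getNextEvent; infer_instance

def pvWitness_getNextEvent : (List (Int × Int)) × Int := ([(1, 2), (3, 4), (5, 6)], 0)

def Spec_getNextEvent (events : List (Int × Int)) (pos : Int) (out : Int) : Prop := out = getNextEvent_alt events pos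
instance (events : List (Int × Int)) (pos : Int) (out : Int) : Decidable (Spec_getNextEvent events pos out) := by unfold Spec_getNextEvent; infer_instance

-- ===== CLAIM (what is proved, stated in full; the proofs are below) =====
def Claim_equal_getNextEvent : Prop := ∀ (events : List (Int × Int)) (pos : Int), Dom_getNextEvent events pos → Pre_getNextEvent events pos → Spec_getNextEvent events pos (getNextEvent events pos)

-- ===== LEMMAS AND PROOFS =====

-- B's segment recursion at offset l over a segment of length n equals A's loop on [l, l+n)
lemma pvSearch_eq_loop (events : List (Int × Int)) (bound : Int) :
    ∀ (n l : ℕ), l + n ≤ events.length →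
      pvSearchB bound ((events.drop l).take n) (l : Int) =
      pvLoopA events bound (l : Int) ((l : Int) + (n : Int)) := by
  intro n
  induction n using Nat.strong_induction_on with
  | _ n ih =>
    intro l hln
    rcases Nat.eq_zero_or_pos n with h0 | hpos
    · subst h0
      rw [pvSearchB, pvLoopA]
      simp
    · have hlen : ((events.drop l).take n).length = n := by
        simp [List.length_take, List.length_drop]; omega
      rw [pvSearchB, pvLoopA]
      have hne : ((events.drop l).take n).isEmpty = false := by
        simp; omega
      have hk : PySem.Int.floordiv ((((events.drop l).take n).length : Nat) : Int) 2
          = ((n / 2 : Nat) : Int) := by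
        rw [hlen]; exact_mod_cast PySem.Int.floordiv_natCast n 2
      have hgetB : PySem.List.pyGet? ((events.drop l).take n) ((n / 2 : Nat) : Int)
          = some (events[l + n / 2]'(by omega)) := by
        rw [PySem.List.pyGet?_natCast]
        rw [List.getElem?_eq_getElem (by omega)]
        congr 1
        rw [List.getElem_take, List.getElem_drop]
      have hmid : PySem.Int.floordiv ((l : Int) + ((l : Int) + (n : Int))) 2
          = ((l + n / 2 : Nat) : Int) := by
        have h1 : ((l : Int) + ((l : Int) + (n : Int))) = ((2 * l + n : Nat) : Int) := by
          push_cast; ring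
        rw [h1]
        have h2 : PySem.Int.floordiv ((2 * l + n : Nat) : Int) 2
            = (((2 * l + n) / 2 : Nat) : Int) := by
          exact_mod_cast PySem.Int.floordiv_natCast (2 * l + n) 2
        rw [h2]
        congr 1; omega
      have hgetA : PySem.List.pyGet? events ((l + n / 2 : Nat) : Int)
          = some (events[l + n / 2]'(by omega)) := by
        rw [PySem.List.pyGet?_natCast, List.getElem?_eq_getElem (by omega)]
      have hlt : ((l : Int) < (l : Int) + (n : Int)) := by omega
      have hk' : PySem.Int.floordiv ((n : Nat) : Int) 2 = ((n / 2 : Nat) : Int) := by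
        exact_mod_cast PySem.Int.floordiv_natCast n 2
      simp only [hne, hlen, hk', hmid, hgetB, hgetA, dif_pos hlt, Bool.false_eq_true, if_false]
      by_cases hb : (events[l + n / 2]'(by omega)).1 > bound
      · simp only [if_pos hb]
        rw [PySem.List.slice_to_natCast, List.take_take]
        have hmin : min (n / 2) n = n / 2 := by omega
        rw [hmin]
        have hcast : ((l + n / 2 : Nat) : Int) = ((l : Nat) : Int) + ((n / 2 : Nat) : Int) := by
          push_cast; ring
        rw [hcast]
        exact ih (n / 2) (by omega) l (by omega)
      · simp only [if_neg hb]
        have hc1 : ((n / 2 : Nat) : Int) + 1 = ((n / 2 + 1 : Nat) : Int) := by push_cast; ring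
        rw [hc1, PySem.List.slice_from_natCast, List.drop_take, List.drop_drop]
        have hn' : n - (n / 2 + 1) = n - n / 2 - 1 := by omega
        have hIH := ih (n - n / 2 - 1) (by omega) (l + (n / 2 + 1)) (by omega)
        have e1 : ((l : Nat) : Int) + ((n / 2 : Nat) : Int) + 1
            = ((l + (n / 2 + 1) : Nat) : Int) := by push_cast; ring
        have e2 : ((l + n / 2 : Nat) : Int) + 1 = ((l + (n / 2 + 1) : Nat) : Int) := by
          push_cast; ring
        have e3 : ((l : Nat) : Int) + ((n : Nat) : Int)
            = ((l + (n / 2 + 1) : Nat) : Int) + ((n - n / 2 - 1 : Nat) : Int) := by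
          push_cast [Nat.cast_sub (by omega : n / 2 + 1 ≤ n)]
          ring_nf
          omega
        rw [hn', e1, e2, e3]
        exact hIH

-- ===== VERDICT (by name: the statement is the Claim_ definition above) =====
theorem getNextEvent_spec : Claim_equal_getNextEvent := by
  intro events pos _ hpre
  obtain ⟨hne, hlo, hhi⟩ := hpre
  have hlen1 : 1 ≤ events.length := by
    cases events with
    | nil => exact absurd rfl hne
    | cons a t => simp
  unfold Spec_getNextEvent getNextEvent getNextEvent_alt
  cases hget : PySem.List.pyGet? events pos with
  | none =>
    exfalso
    rw [PySem.List.pyGet?_eq_none_iff] at hget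
    exact hget (by constructor <;> omega)
  | some se =>
    have hl : pos + 1 = (((pos + 1).toNat : Nat) : Int) := (Int.toNat_of_nonneg (by omega)).symm
    have hlle : (pos + 1).toNat ≤ events.length := by omega
    rw [hl, PySem.List.slice_from_natCast]
    have htake : (events.drop (pos + 1).toNat).take (events.length - (pos + 1).toNat)
        = events.drop (pos + 1).toNat := by
      apply List.take_of_length_le
      simp
    rw [← htake]
    have hfin : ((events.length : Nat) : Int)
        = (((pos + 1).toNat : Nat) : Int) + ((events.length - (pos + 1).toNat : Nat) : Int) := by
      push_cast [Nat.cast_sub hlle]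
      ring
    rw [hfin]
    exact (pvSearch_eq_loop events se.2 (events.length - (pos + 1).toNat) (pos + 1).toNat
      (by omega)).symm
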